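-- pv_equiv track=rewrite | github.com/rudder-framework/primitives | python/pmtvs/dynamical/lyapunov.py | _validate_embedding_params
-- ===== SOURCE A (Python) =====
-- from typing import Tuple, Optional
--
-- def _validate_embedding_params(
--     n: int,
--     dimension: int,
--     delay: int,
--     min_points: int = 10
-- ) -> Tuple[bool, int, int, str]:
--     """
--     Validate embedding parameters and suggest adjustments if invalid.
--
--     Parameters
--     ----------
--     n : int
--         Signal length
--     dimension : int
--         Proposed embedding dimension
--     delay : int
--         Proposed time delay
--     min_points : int
--         Minimum embedded points required
--
--     Returns
--     -------
--     tuple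
--         (is_valid, adjusted_dimension, adjusted_delay, message)
--         If is_valid is False and adjustments can't help, dimension=0.
--     """
--     n_points = n - (dimension - 1) * delay
--
--     if n_points >= min_points:
--         return True, dimension, delay, "OK"
--
--     # Try reducing dimension first (preserves temporal structure)
--     for new_dim in range(dimension - 1, 1, -1):
--         new_n_points = n - (new_dim - 1) * delay
--         if new_n_points >= min_points:
--             return True, new_dim, delay, f"Reduced dimension {dimension}→{new_dim}"
--
--     # Try reducing delay
--     for new_delay in range(delay - 1, 0, -1):
--         new_n_points = n - (dimension - 1) * new_delay
--         if new_n_points >= min_points: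
--             return True, dimension, new_delay, f"Reduced delay {delay}→{new_delay}"
--
--     # Try reducing both
--     for new_dim in range(dimension - 1, 1, -1):
--         for new_delay in range(delay - 1, 0, -1):
--             new_n_points = n - (new_dim - 1) * new_delay
--             if new_n_points >= min_points:
--                 return True, new_dim, new_delay, f"Reduced dim {dimension}→{new_dim}, delay {delay}→{new_delay}"
--
--     # Signal too short for any valid embedding
--     return False, 0, 0, f"Signal too short ({n} samples) for Lyapunov analysis"
-- ===== SOURCE B (Python) =====
-- def _validate_embedding_params(n, dimension, delay, min_points=10):
--     # Closed-form: solve each monotone constraint n - (d-1)*t >= min_points directly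
--     # instead of scanning candidate dimensions/delays one by one.
--     M = n - min_points
--     if (dimension - 1) * delay <= M:
--         return True, dimension, delay, "OK"
--     if delay >= 1 and dimension >= 3:
--         new_dim = min(dimension - 1, M // delay + 1)
--         if new_dim >= 2:
--             return True, new_dim, delay, f"Reduced dimension {dimension}→{new_dim}"
--     if dimension >= 2 and delay >= 2:
--         new_delay = min(delay - 1, M // (dimension - 1))
--         if new_delay >= 1:
--             return True, dimension, new_delay, f"Reduced delay {delay}→{new_delay}"
--     if dimension >= 3 and delay >= 2 and M >= 1:
--         new_dim = min(dimension - 1, M + 1)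
--         new_delay = min(delay - 1, M // (new_dim - 1))
--         return True, new_dim, new_delay, f"Reduced dim {dimension}→{new_dim}, delay {delay}→{new_delay}"
--     return False, 0, 0, f"Signal too short ({n} samples) for Lyapunov analysis"
-- ===== Notes on version B (the rewrite author's own statement) =====
-- stated objective: faster
-- what changed: Replaced A's three descending candidate scans (including a nested dim*delay loop) by closed-form arithmetic: each scan looks for the largest candidate satisfying a monotone linear constraint n-(d-1)*t>=min_points, so the answer is min(upper bound, floor-division bound), computed in O(1).
import Mathlib
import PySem

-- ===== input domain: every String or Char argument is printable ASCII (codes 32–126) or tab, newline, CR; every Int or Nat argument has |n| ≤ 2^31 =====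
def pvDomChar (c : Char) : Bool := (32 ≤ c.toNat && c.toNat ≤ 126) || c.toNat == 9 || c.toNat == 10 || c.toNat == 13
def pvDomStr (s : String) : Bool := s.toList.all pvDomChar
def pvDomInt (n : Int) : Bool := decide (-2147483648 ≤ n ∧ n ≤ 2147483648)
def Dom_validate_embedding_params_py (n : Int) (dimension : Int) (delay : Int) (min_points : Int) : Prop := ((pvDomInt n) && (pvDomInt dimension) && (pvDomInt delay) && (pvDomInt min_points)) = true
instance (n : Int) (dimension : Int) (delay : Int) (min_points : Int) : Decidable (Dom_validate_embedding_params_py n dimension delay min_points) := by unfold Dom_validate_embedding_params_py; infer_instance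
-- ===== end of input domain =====

-- B replaces A's descending candidate scans by closed-form floor-division bounds (O(1) instead of
-- O(dimension*delay)); the equivalence below is exact on all integer inputs in Dom.

-- ===== PORT A =====
-- 'for x in range(...): if cond(x): return f(x)' — first hit of a scan, else fall through
def pvFind {R : Type} (p : Int → Bool) (f : Int → R) : List Int → Option R
  | [] => none
  | x :: rest => if p x then some (f x) else pvFind p f rest

-- outer loop of A's third phase: first x whose inner scan returns a value
def pvFindSome {R : Type} (g : Int → Option R) : List Int → Option R
  | [] => none
  | x :: rest =>
    match g x with
    | some r => some r
    | none => pvFindSome g rest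

def validate_embedding_params_py (n : Int) (dimension : Int) (delay : Int) (min_points : Int) : Bool × Int × Int × String :=
  if min_points ≤ n - (dimension - 1) * delay then
    (true, dimension, delay, "OK")
  else
    match pvFind (fun new_dim => decide (min_points ≤ n - (new_dim - 1) * delay))
        (fun new_dim => (true, new_dim, delay,
          "Reduced dimension " ++ PySem.Int.toStr dimension ++ "→" ++ PySem.Int.toStr new_dim))
        (PySem.List.pyRange (dimension - 1) 1 (-1)) with
    | some r => r
    | none =>
      match pvFind (fun new_delay => decide (min_points ≤ n - (dimension - 1) * new_delay))
          (fun new_delay => (true, dimension, new_delay,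
            "Reduced delay " ++ PySem.Int.toStr delay ++ "→" ++ PySem.Int.toStr new_delay))
          (PySem.List.pyRange (delay - 1) 0 (-1)) with
      | some r => r
      | none =>
        match pvFindSome (fun new_dim =>
            pvFind (fun new_delay => decide (min_points ≤ n - (new_dim - 1) * new_delay))
              (fun new_delay => (true, new_dim, new_delay,
                "Reduced dim " ++ PySem.Int.toStr dimension ++ "→" ++ PySem.Int.toStr new_dim ++
                ", delay " ++ PySem.Int.toStr delay ++ "→" ++ PySem.Int.toStr new_delay))
              (PySem.List.pyRange (delay - 1) 0 (-1)))
            (PySem.List.pyRange (dimension - 1) 1 (-1)) with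
        | some r => r
        | none =>
          (false, 0, 0, "Signal too short (" ++ PySem.Int.toStr n ++ " samples) for Lyapunov analysis")

-- ===== PORT B =====
def validate_embedding_params_py_alt (n : Int) (dimension : Int) (delay : Int) (min_points : Int) : Bool × Int × Int × String :=
  if (dimension - 1) * delay ≤ n - min_points then
    (true, dimension, delay, "OK")
  else if 1 ≤ delay ∧ 3 ≤ dimension ∧
      2 ≤ min (dimension - 1) (PySem.Int.floordiv (n - min_points) delay + 1) then
    (true, min (dimension - 1) (PySem.Int.floordiv (n - min_points) delay + 1), delay,
      "Reduced dimension " ++ PySem.Int.toStr dimension ++ "→" ++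
        PySem.Int.toStr (min (dimension - 1) (PySem.Int.floordiv (n - min_points) delay + 1)))
  else if 2 ≤ dimension ∧ 2 ≤ delay ∧
      1 ≤ min (delay - 1) (PySem.Int.floordiv (n - min_points) (dimension - 1)) then
    (true, dimension, min (delay - 1) (PySem.Int.floordiv (n - min_points) (dimension - 1)),
      "Reduced delay " ++ PySem.Int.toStr delay ++ "→" ++
        PySem.Int.toStr (min (delay - 1) (PySem.Int.floordiv (n - min_points) (dimension - 1))))
  else if 3 ≤ dimension ∧ 2 ≤ delay ∧ 1 ≤ n - min_points then
    (true, min (dimension - 1) (n - min_points + 1),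
      min (delay - 1) (PySem.Int.floordiv (n - min_points) (min (dimension - 1) (n - min_points + 1) - 1)),
      "Reduced dim " ++ PySem.Int.toStr dimension ++ "→" ++
        PySem.Int.toStr (min (dimension - 1) (n - min_points + 1)) ++
        ", delay " ++ PySem.Int.toStr delay ++ "→" ++
        PySem.Int.toStr (min (delay - 1) (PySem.Int.floordiv (n - min_points) (min (dimension - 1) (n - min_points + 1) - 1))))
  else
    (false, 0, 0, "Signal too short (" ++ PySem.Int.toStr n ++ " samples) for Lyapunov analysis")

-- ===== PRECONDITION & SPEC =====
def Spec_validate_embedding_params_py (n : Int) (dimension : Int) (delay : Int) (min_points : Int) (out : Bool × Int × Int × String) : Prop := out = validate_embedding_params_py_alt n dimension delay min_points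
instance (n : Int) (dimension : Int) (delay : Int) (min_points : Int) (out : Bool × Int × Int × String) : Decidable (Spec_validate_embedding_params_py n dimension delay min_points out) := by unfold Spec_validate_embedding_params_py; infer_instance

-- ===== CLAIM (what is proved, stated in full; the proofs are below) =====
def Claim_equal_validate_embedding_params_py : Prop := ∀ (n : Int) (dimension : Int) (delay : Int) (min_points : Int), Dom_validate_embedding_params_py n dimension delay min_points → Spec_validate_embedding_params_py n dimension delay min_points (validate_embedding_params_py n dimension delay min_points)

-- ===== LEMMAS AND PROOFS =====

-- a scan whose test is everywhere false returns none
theorem pvFind_none {R : Type} (p : Int → Bool) (f : Int → R) (xs : List Int)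
    (h : ∀ x ∈ xs, p x = false) : pvFind p f xs = none := by
  induction xs with
  | nil => rfl
  | cons x rest ih =>
    simp only [pvFind, h x (by simp)]
    exact ih (fun y hy => h y (by simp [hy]))

theorem pvFindSome_none {R : Type} (g : Int → Option R) (xs : List Int)
    (h : ∀ x ∈ xs, g x = none) : pvFindSome g xs = none := by
  induction xs with
  | nil => rfl
  | cons x rest ih =>
    simp only [pvFindSome, h x (by simp)]
    exact ih (fun y hy => h y (by simp [hy]))

-- first hit of a descending scan for a downward-closed test 'x ≤ B' is min hi B (if in range)
theorem pvFind_desc_aux {R : Type} (p : Int → Bool) (f : Int → R) (lo B : Int)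
    (hp : ∀ x : Int, lo < x → p x = decide (x ≤ B)) :
    ∀ (k : Nat) (hi : Int), (hi - lo).toNat = k →
      pvFind p f (PySem.List.pyRange hi lo (-1)) =
        if lo + 1 ≤ min hi B then some (f (min hi B)) else none := by
  intro k
  induction k with
  | zero =>
    intro hi hk
    rw [PySem.List.pyRange_neg_one_eq_nil (by omega)]
    rw [if_neg (by omega)]
    rfl
  | succ k ih =>
    intro hi hk
    have hlt : lo < hi := by omega
    rw [PySem.List.pyRange_neg_one_cons hlt]
    simp only [pvFind, hp hi hlt]
    by_cases hB : hi ≤ B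
    · simp only [hB, decide_true, if_true]
      rw [if_pos (by omega)]
      congr 2
      omega
    · simp only [hB, decide_false, Bool.false_eq_true, if_false]
      rw [ih (hi - 1) (by omega)]
      have : min (hi - 1) B = min hi B := by omega
      rw [this]

theorem pvFind_desc {R : Type} (p : Int → Bool) (f : Int → R) (lo B hi : Int)
    (hp : ∀ x : Int, lo < x → p x = decide (x ≤ B)) :
    pvFind p f (PySem.List.pyRange hi lo (-1)) =
      if lo + 1 ≤ min hi B then some (f (min hi B)) else none :=
  pvFind_desc_aux p f lo B hp _ hi rfl

theorem pvFindSome_desc_aux {R : Type} (g : Int → Option R) (f : Int → R) (lo B : Int)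
    (hg : ∀ x : Int, lo < x → g x = if x ≤ B then some (f x) else none) :
    ∀ (k : Nat) (hi : Int), (hi - lo).toNat = k →
      pvFindSome g (PySem.List.pyRange hi lo (-1)) =
        if lo + 1 ≤ min hi B then some (f (min hi B)) else none := by
  intro k
  induction k with
  | zero =>
    intro hi hk
    rw [PySem.List.pyRange_neg_one_eq_nil (by omega)]
    rw [if_neg (by omega)]
    rfl
  | succ k ih =>
    intro hi hk
    have hlt : lo < hi := by omega
    rw [PySem.List.pyRange_neg_one_cons hlt]
    simp only [pvFindSome, hg hi hlt]
    by_cases hB : hi ≤ B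
    · simp only [hB, if_true]
      rw [if_pos (by omega)]
      have : min hi B = hi := by omega
      rw [this]
    · simp only [hB, if_false]
      rw [ih (hi - 1) (by omega)]
      have : min (hi - 1) B = min hi B := by omega
      rw [this]

theorem pvFindSome_desc {R : Type} (g : Int → Option R) (f : Int → R) (lo B hi : Int)
    (hg : ∀ x : Int, lo < x → g x = if x ≤ B then some (f x) else none) :
    pvFindSome g (PySem.List.pyRange hi lo (-1)) =
      if lo + 1 ≤ min hi B then some (f (min hi B)) else none :=
  pvFindSome_desc_aux g f lo B hg _ hi rfl

theorem validate_embedding_params_py_main (n d t m : Int) :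
    validate_embedding_params_py n d t m = validate_embedding_params_py_alt n d t m := by
  unfold validate_embedding_params_py validate_embedding_params_py_alt
  by_cases h0 : (d - 1) * t ≤ n - m
  · rw [if_pos (by omega), if_pos h0]
  · rw [if_neg (by omega), if_neg h0]
    by_cases ht1 : 1 ≤ t
    · -- phase 1 characterized by the floor-division bound
      rw [pvFind_desc _ _ 1 (PySem.Int.floordiv (n - m) t + 1) (d - 1)
        (fun x hx => by
          have hb := PySem.Int.le_floordiv_iff_mul_le (a := n - m) (b := t) (q := x - 1) (by omega)
          simp only [decide_eq_decide]
          constructor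
          · intro h; have : x - 1 ≤ PySem.Int.floordiv (n - m) t := hb.mpr (by nlinarith); omega
          · intro h; have : (x - 1) * t ≤ n - m := hb.mp (by omega); omega)]
      by_cases hc1 : 2 ≤ min (d - 1) (PySem.Int.floordiv (n - m) t + 1)
      · rw [if_pos (by omega)]
        rw [if_pos ⟨ht1, by omega, hc1⟩]
      · rw [if_neg (by omega)]
        rw [if_neg (by intro h; exact hc1 h.2.2)]
        -- phase 2
        by_cases hd2 : 2 ≤ d
        · rw [pvFind_desc _ _ 0 (PySem.Int.floordiv (n - m) (d - 1)) (t - 1)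
            (fun x hx => by
              have hb := PySem.Int.le_floordiv_iff_mul_le (a := n - m) (b := d - 1) (q := x) (by omega)
              simp only [decide_eq_decide]
              constructor
              · intro h; exact hb.mpr (by nlinarith)
              · intro h; have h2 := hb.mp h; rw [mul_comm] at h2; omega)]
          by_cases hc2 : 1 ≤ min (t - 1) (PySem.Int.floordiv (n - m) (d - 1))
          · rw [if_pos (by omega)]
            rw [if_pos ⟨hd2, by omega, hc2⟩]
          · rw [if_neg (by omega)]
            rw [if_neg (by intro h; exact hc2 h.2.2)]
            -- phase 3
            by_cases ht2 : 2 ≤ t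
            · rw [pvFindSome_desc _
                (fun x => (true, x, min (t - 1) (PySem.Int.floordiv (n - m) (x - 1)),
                  "Reduced dim " ++ PySem.Int.toStr d ++ "→" ++ PySem.Int.toStr x ++
                  ", delay " ++ PySem.Int.toStr t ++ "→" ++
                  PySem.Int.toStr (min (t - 1) (PySem.Int.floordiv (n - m) (x - 1)))))
                1 (n - m + 1) (d - 1)
                (fun x hx => by
                  rw [pvFind_desc _ _ 0 (PySem.Int.floordiv (n - m) (x - 1)) (t - 1)
                    (fun y hy => by
                      have hb := PySem.Int.le_floordiv_iff_mul_le (a := n - m) (b := x - 1) (q := y) (by omega)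
                      simp only [decide_eq_decide]
                      constructor
                      · intro h; exact hb.mpr (by nlinarith)
                      · intro h; have h2 := hb.mp h; rw [mul_comm] at h2; omega)]
                  have hb1 := PySem.Int.le_floordiv_iff_mul_le (a := n - m) (b := x - 1) (q := 1) (by omega)
                  by_cases hxB : x ≤ n - m + 1
                  · rw [if_pos (by have := hb1.mpr (by omega); omega), if_pos hxB]
                  · rw [if_neg (by intro h; have := hb1.mp (by omega); omega), if_neg hxB])]
              by_cases hc3 : 2 ≤ min (d - 1) (n - m + 1)
              · rw [if_pos (by omega)]
                rw [if_pos ⟨by omega, ht2, by omega⟩]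
              · rw [if_neg (by omega)]
                rw [if_neg (by intro h; exact hc3 (by omega))]
            · -- t = 1: all inner delay-ranges are empty
              rw [pvFindSome_none _ _ (fun x hx => by
                rw [PySem.List.pyRange_neg_one_eq_nil (by omega)]; rfl)]
              rw [if_neg (by intro h; exact ht2 h.2.1)]
        · -- d ≤ 1: phase-2 test is everywhere false, phase-3 outer range is empty
          rw [pvFind_none _ _ _ (fun x hx => by
            have hx' := (PySem.List.mem_pyRange_neg_one).mp hx
            simp only [decide_eq_false_iff_not]
            intro h
            nlinarith [mul_le_mul_of_nonpos_left (show x ≤ t - 1 by omega) (show d - 1 ≤ 0 by omega)])]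
          rw [if_neg (by intro h; omega)]
          rw [pvFindSome_none _ _ (fun x hx => by
            have hx' := (PySem.List.mem_pyRange_neg_one).mp hx
            exact absurd hx'.2 (by omega))]
          rw [if_neg (by intro h; omega)]
    · -- t ≤ 0: phase-1 test is everywhere false, phases 2 and 3 scan empty delay-ranges
      rw [pvFind_none _ _ _ (fun x hx => by
        have hx' := (PySem.List.mem_pyRange_neg_one).mp hx
        simp only [decide_eq_false_iff_not]
        intro h
        nlinarith [mul_le_mul_of_nonpos_right (show x - 1 ≤ d - 2 by omega) (show t ≤ 0 by omega)])]
      rw [if_neg (by intro h; omega)]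
      rw [pvFind_none _ _ _ (fun x hx => by
        rw [PySem.List.pyRange_neg_one_eq_nil (show t - 1 ≤ 0 by omega)] at hx
        simp at hx)]
      rw [if_neg (by intro h; omega)]
      rw [pvFindSome_none _ _ (fun x hx => by
        rw [PySem.List.pyRange_neg_one_eq_nil (show t - 1 ≤ 0 by omega)]
        rfl)]
      rw [if_neg (by intro h; omega)]

-- ===== VERDICT (by name: the statement is the Claim_ definition above) =====
theorem validate_embedding_params_py_spec : Claim_equal_validate_embedding_params_py := by
  intro n dimension delay min_points _
  exact validate_embedding_params_py_main n dimension delay min_points
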